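-- pv_equiv track=rewrite | github.com/SweekrithiNayyyak/Hackerrank-DSA | Implementation/migratory_birds.py | migratoryBirds
-- ===== SOURCE A (Python) =====
-- def migratoryBirds(arr):
--     d = dict()
--     for num in arr:
--         if num in d.keys():
--
--             d[num] += 1
--         else:
--             d[num] = 1
--     max_val = max(d.values())
--     l = []
--     for k, v in d.items():
--         if v == max_val:
--             l.append(k)
--     return min(l)
-- ===== SOURCE B (Python) =====
-- def migratoryBirds(arr):
--     s = sorted(arr)
--     best = s[0]
--     best_count = 0
--     cur = s[0]
--     cur_count = 0
--     for x in s: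
--         if x == cur:
--             cur_count += 1
--         else:
--             cur = x
--             cur_count = 1
--         if cur_count > best_count:
--             best = cur
--             best_count = cur_count
--     return best
-- ===== Notes on version B (the rewrite author's own statement) =====
-- stated objective: alternative
-- what changed: Replaced the dict-counting pass plus max-over-values and min-over-argmax passes by sorting a copy and making one run-length scan over the sorted list, keeping the first (smallest) value whose run strictly exceeds the best count.
import Mathlib
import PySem

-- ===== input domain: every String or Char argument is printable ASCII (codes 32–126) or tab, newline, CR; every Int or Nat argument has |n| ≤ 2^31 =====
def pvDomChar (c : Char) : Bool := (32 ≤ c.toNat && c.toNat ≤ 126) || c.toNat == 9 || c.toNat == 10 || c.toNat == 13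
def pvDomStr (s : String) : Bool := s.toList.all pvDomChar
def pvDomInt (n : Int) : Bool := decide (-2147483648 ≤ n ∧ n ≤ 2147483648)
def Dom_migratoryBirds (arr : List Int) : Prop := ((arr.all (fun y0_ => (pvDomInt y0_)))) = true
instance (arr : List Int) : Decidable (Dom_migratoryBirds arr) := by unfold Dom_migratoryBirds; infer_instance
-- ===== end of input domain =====

-- B replaces A's dict-count + max/min passes with a sort-and-run-scan (alternative algorithm, same results).
-- ===== PORT A =====
def migratoryBirds (arr : List Int) : Int :=
  let d := arr.foldl (fun d num =>
    if d.contains num then d.insert num (d.getD num 0 + 1) else d.insert num 1)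
    (PySem.Dict.empty : PySem.Dict Int Int)
  let max_val := (PySem.List.max? d.values (fun v => v)).getD 0
  let l := d.items.foldl (fun l kv => if kv.2 == max_val then l ++ [kv.1] else l) []
  (PySem.List.min? l (fun k => k)).getD 0

-- ===== PORT B =====
def migratoryBirds_alt (arr : List Int) : Int :=
  let s := PySem.List.sorted arr (fun x => x) false
  match s with
  | [] => 0   -- s[0] raises IndexError in Python; excluded by Pre_
  | h :: _ =>
    (s.foldl (fun (st : Int × Int × Int × Int) x =>
        let best := st.1; let bestc := st.2.1; let cur := st.2.2.1; let curc := st.2.2.2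
        let cur' := if x == cur then cur else x
        let curc' := if x == cur then curc + 1 else 1
        if curc' > bestc then (cur', curc', cur', curc') else (best, bestc, cur', curc'))
      (h, 0, h, 0)).1

-- ===== PRECONDITION & SPEC =====
-- A raises ValueError (max() of empty sequence) on the empty list; B raises IndexError there.
def Pre_migratoryBirds (arr : List Int) : Prop := arr ≠ []
instance (arr : List Int) : Decidable (Pre_migratoryBirds arr) := by unfold Pre_migratoryBirds; infer_instance
def pvWitness_migratoryBirds : List Int := [1, 2, 2, 3]
def Spec_migratoryBirds (arr : List Int) (out : Int) : Prop := out = migratoryBirds_alt arr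
instance (arr : List Int) (out : Int) : Decidable (Spec_migratoryBirds arr out) := by unfold Spec_migratoryBirds; infer_instance

-- ===== CLAIM (what is proved, stated in full; the proofs are below) =====
def Claim_equal_migratoryBirds : Prop := ∀ (arr : List Int), Dom_migratoryBirds arr → Pre_migratoryBirds arr → Spec_migratoryBirds arr (migratoryBirds arr)

-- ===== LEMMAS AND PROOFS =====

-- characterisation: m is the smallest value of maximal multiplicity in arr
def IsAnswer (arr : List Int) (m : Int) : Prop :=
  m ∈ arr ∧ (∀ y ∈ arr, arr.count y ≤ arr.count m) ∧ (∀ y ∈ arr, arr.count y = arr.count m → m ≤ y)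

theorem isAnswer_unique {arr : List Int} {m₁ m₂ : Int}
    (h₁ : IsAnswer arr m₁) (h₂ : IsAnswer arr m₂) : m₁ = m₂ := by
  obtain ⟨hm₁, hmax₁, hmin₁⟩ := h₁
  obtain ⟨hm₂, hmax₂, hmin₂⟩ := h₂
  have e : arr.count m₁ = arr.count m₂ :=
    le_antisymm (hmax₂ m₁ hm₁) (hmax₁ m₂ hm₂)
  exact le_antisymm (hmin₁ m₂ hm₂ e.symm) (hmin₂ m₁ hm₁ e)

theorem portA_isAnswer (arr : List Int) (hne : arr ≠ []) :
    IsAnswer arr (migratoryBirds arr) := by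
  have hf : (fun (d : PySem.Dict Int Int) num =>
      if d.contains num then d.insert num (d.getD num 0 + 1) else d.insert num 1)
      = fun (d : PySem.Dict Int Int) x => d.insert x (d.getD x 0 + 1) := by
    funext d x
    by_cases h : d.contains x = true
    · simp [h]
    · have h0 : d.getD x 0 = 0 :=
        PySem.Dict.getD_of_not_contains d 0 (by simpa using h)
      simp [h, h0]
  have hd : arr.foldl (fun d num =>
      if d.contains num then d.insert num (d.getD num 0 + 1) else d.insert num 1)
      (PySem.Dict.empty : PySem.Dict Int Int) = PySem.Dict.counter arr := by
    rw [hf]; exact PySem.Dict.foldl_insert_getD_add_one_eq_counter arr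
  have hitems : (PySem.Dict.counter arr).items
      = (PySem.Set.ofList arr).map (fun k => (k, (arr.count k : Int))) :=
    PySem.Dict.items_counter arr
  set S : List Int := PySem.Set.ofList arr with hS
  have hSne : S ≠ [] := by
    intro h0
    obtain ⟨a, ha⟩ := List.exists_mem_of_ne_nil arr hne
    have : a ∈ S := (PySem.Set.mem_ofList arr a).2 ha
    simp [h0] at this
  -- the values list
  have hvals : (PySem.Dict.counter arr).values = S.map (fun k => (arr.count k : Int)) := by
    simp only [PySem.Dict.values, hitems]
    simp [List.map_map, Function.comp]
  have hvne : (PySem.Dict.counter arr).values ≠ [] := by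
    rw [hvals]; simpa using hSne
  obtain ⟨M, hM⟩ : ∃ M, PySem.List.max? (PySem.Dict.counter arr).values (fun v => v) = some M := by
    cases hmx : PySem.List.max? (PySem.Dict.counter arr).values (fun v => v) with
    | none => exact absurd ((PySem.List.max?_eq_none_iff _ _).mp hmx) hvne
    | some M => exact ⟨M, rfl⟩
  have hMmem : M ∈ (PySem.Dict.counter arr).values := PySem.List.max?_mem hM
  have hMmax : ∀ v ∈ (PySem.Dict.counter arr).values, v ≤ M := by
    intro v hv; exact PySem.List.max?_isMax hM v hv
  -- the filtered list of keys
  have hl : (PySem.Dict.counter arr).items.foldl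
      (fun l kv => if kv.2 == M then l ++ [kv.1] else l) []
      = S.filter (fun k => (arr.count k : Int) == M) := by
    rw [PySem.List.foldl_append_if (fun kv : Int × Int => kv.2 == M) (fun kv => kv.1)]
    rw [hitems, List.filter_map, List.map_map]
    simp [Function.comp_def]
  set l : List Int := S.filter (fun k => (arr.count k : Int) == M) with hldef
  have hlne : l ≠ [] := by
    rw [hvals] at hMmem
    obtain ⟨k, hkS, hkM⟩ := List.mem_map.mp hMmem
    intro h0
    have : k ∈ l := List.mem_filter.mpr ⟨hkS, by simpa using hkM⟩
    simp [h0] at this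
  obtain ⟨m, hm⟩ : ∃ m, PySem.List.min? l (fun k => k) = some m := by
    cases hmn : PySem.List.min? l (fun k => k) with
    | none => exact absurd ((PySem.List.min?_eq_none_iff _ _).mp hmn) hlne
    | some m => exact ⟨m, rfl⟩
  have hres : migratoryBirds arr = m := by
    unfold migratoryBirds
    simp only [hd, hM, Option.getD_some, hl, hm]
  have hml : m ∈ l := PySem.List.min?_mem hm
  have hmmin : ∀ y ∈ l, m ≤ y := by
    intro y hy; exact PySem.List.min?_isMin hm y hy
  have hmS : m ∈ S := (List.mem_filter.mp hml).1
  have hmM : (arr.count m : Int) = M := by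
    have := (List.mem_filter.mp hml).2; simpa using this
  rw [hres]
  refine ⟨(PySem.Set.mem_ofList arr m).1 hmS, ?_, ?_⟩
  · intro y hy
    have hyS : y ∈ S := (PySem.Set.mem_ofList arr y).2 hy
    have : (arr.count y : Int) ∈ (PySem.Dict.counter arr).values := by
      rw [hvals]; exact List.mem_map.mpr ⟨y, hyS, rfl⟩
    have := hMmax _ this
    rw [← hmM] at this
    exact_mod_cast this
  · intro y hy hcnt
    have hyS : y ∈ S := (PySem.Set.mem_ofList arr y).2 hy
    have hyl : y ∈ l := List.mem_filter.mpr ⟨hyS, by simp [hcnt, hmM]⟩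
    exact hmmin y hyl

-- B-side loop invariant
def f_alt : (Int × Int × Int × Int) → Int → (Int × Int × Int × Int) :=
  fun st x =>
    let best := st.1; let bestc := st.2.1; let cur := st.2.2.1; let curc := st.2.2.2
    let cur' := if x == cur then cur else x
    let curc' := if x == cur then curc + 1 else 1
    if curc' > bestc then (cur', curc', cur', curc') else (best, bestc, cur', curc')

def ScanInv (p : List Int) (st : Int × Int × Int × Int) : Prop :=
  p.getLast? = some st.2.2.1 ∧ st.2.2.2 = (p.count st.2.2.1 : Int) ∧
  st.1 ∈ p ∧ st.2.1 = (p.count st.1 : Int) ∧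
  (∀ y ∈ p, (p.count y : Int) ≤ st.2.1) ∧
  (∀ y ∈ p, p.count y = p.count st.1 → st.1 ≤ y)

theorem le_getLast_of_pairwise {p : List Int} {c : Int}
    (hs : p.Pairwise (· ≤ ·)) (hc : p.getLast? = some c) : ∀ y ∈ p, y ≤ c := by
  obtain ⟨p', rfl⟩ := List.getLast?_eq_some_iff.mp hc
  intro y hy
  rcases List.mem_append.mp hy with h | h
  · exact (List.pairwise_append.mp hs).2.2 y h c (by simp)
  · simp only [List.mem_singleton] at h; exact le_of_eq h

theorem count_append_singleton (p : List Int) (x y : Int) :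
    (p ++ [x]).count y = p.count y + (if y = x then 1 else 0) := by
  by_cases h : y = x
  · subst h; simp [List.count_append]
  · simp [List.count_append, h, Ne.symm h]

theorem scanInv_def (p : List Int) (a b c d : Int) :
    ScanInv p (a, b, c, d) ↔
      (p.getLast? = some c ∧ d = (p.count c : Int) ∧ a ∈ p ∧ b = (p.count a : Int) ∧
       (∀ y ∈ p, (p.count y : Int) ≤ b) ∧ (∀ y ∈ p, p.count y = p.count a → a ≤ y)) :=
  Iff.rfl

theorem inv_step (p : List Int) (st : Int × Int × Int × Int) (x : Int)
    (hinv : ScanInv p st) (hsort : p.Pairwise (· ≤ ·)) (hle : ∀ y ∈ p, y ≤ x) :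
    ScanInv (p ++ [x]) (f_alt st x) := by
  obtain ⟨best, bestc, cur, curc⟩ := st
  rw [scanInv_def] at hinv
  obtain ⟨h1, h2, h3, h4, h5, h6⟩ := hinv
  have hlast : ∀ y ∈ p, y ≤ cur := le_getLast_of_pairwise hsort h1
  have hcur_mem : cur ∈ p := by
    obtain ⟨p', rfl⟩ := List.getLast?_eq_some_iff.mp h1; simp
  by_cases hx : x = cur
  · subst hx
    have hbeq : (x == x) = true := by simp
    simp only [f_alt, hbeq, if_true]
    split_ifs with hgt
    · rw [scanInv_def]
      refine ⟨by simp, ?_, by simp [hcur_mem], ?_, ?_, ?_⟩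
      · simp only [count_append_singleton]; push_cast; omega
      · simp only [count_append_singleton]; push_cast; omega
      · intro y hy
        rcases List.mem_append.mp hy with h | h
        · by_cases hyx : y = x
          · subst hyx; simp only [count_append_singleton]; push_cast; omega
          · have := h5 y h
            simp only [count_append_singleton, if_neg hyx]; push_cast; omega
        · simp only [List.mem_singleton] at h; subst h
          simp only [count_append_singleton]; push_cast; omega
      · intro y hy hcy
        by_cases hyx : y = x
        · exact le_of_eq hyx.symm
        · exfalso
          rcases List.mem_append.mp hy with h | h
          · have := h5 y h
            rw [count_append_singleton, if_neg hyx, count_append_singleton, if_pos rfl] at hcy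
            omega
          · simp only [List.mem_singleton] at h; exact hyx h
    · have hbc : best ≠ x := by
        intro h; subst h; omega
      rw [scanInv_def]
      refine ⟨by simp, ?_, List.mem_append.mpr (Or.inl h3), ?_, ?_, ?_⟩
      · simp only [count_append_singleton]; push_cast; omega
      · simp only [count_append_singleton, if_neg hbc]; simpa using h4
      · intro y hy
        rcases List.mem_append.mp hy with h | h
        · by_cases hyx : y = x
          · subst hyx; simp only [count_append_singleton]; push_cast; omega
          · have := h5 y h
            simp only [count_append_singleton, if_neg hyx]; push_cast; omega
        · simp only [List.mem_singleton] at h; subst h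
          simp only [count_append_singleton]; push_cast; omega
      · intro y hy hcy
        rw [count_append_singleton p x y, count_append_singleton p x best, if_neg hbc] at hcy
        by_cases hyx : y = x
        · subst hyx; simpa using hlast best h3
        · rw [if_neg hyx] at hcy
          rcases List.mem_append.mp hy with h | h
          · exact h6 y h (by omega)
          · simp only [List.mem_singleton] at h; exact absurd h hyx
  · have hxp : x ∉ p := fun hxin => hx (le_antisymm (hlast x hxin) (hle cur hcur_mem))
    have hbeq : (x == cur) = false := by simpa using hx
    simp only [f_alt, hbeq, Bool.false_eq_true, if_false]
    have hbpos : 0 < p.count best := List.count_pos_iff.mpr h3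
    have hcx : p.count x = 0 := List.count_eq_zero.mpr hxp
    have hbx : best ≠ x := fun h => hxp (h ▸ h3)
    split_ifs with hgt
    · exfalso; omega
    · rw [scanInv_def]
      refine ⟨by simp, ?_, List.mem_append.mpr (Or.inl h3), ?_, ?_, ?_⟩
      · simp [hcx]
      · simp only [count_append_singleton, if_neg hbx]; simpa using h4
      · intro y hy
        rcases List.mem_append.mp hy with h | h
        · have hyx : y ≠ x := fun he => hxp (he ▸ h)
          have := h5 y h
          simp only [count_append_singleton, if_neg hyx]; push_cast; omega
        · simp only [List.mem_singleton] at h; subst h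
          simp only [count_append_singleton, hcx]; push_cast; omega
      · intro y hy hcy
        rw [count_append_singleton p x y, count_append_singleton p x best, if_neg hbx] at hcy
        by_cases hyx : y = x
        · subst hyx; exact hle best h3
        · rw [if_neg hyx] at hcy
          rcases List.mem_append.mp hy with h | h
          · exact h6 y h (by omega)
          · simp only [List.mem_singleton] at h; exact absurd h hyx

theorem inv_loop (rest : List Int) : ∀ (p : List Int) (st : Int × Int × Int × Int),
    ScanInv p st → (p ++ rest).Pairwise (· ≤ ·) → ScanInv (p ++ rest) (rest.foldl f_alt st) := by
  induction rest with
  | nil => intro p st h _; simpa using h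
  | cons x rs ih =>
    intro p st h hsort
    have hsort' : ((p ++ [x]) ++ rs).Pairwise (· ≤ ·) := by
      simpa [List.append_assoc] using hsort
    have hpx : (p ++ [x]).Pairwise (· ≤ ·) :=
      hsort'.sublist (List.sublist_append_left _ _)
    have hp : p.Pairwise (· ≤ ·) := hpx.sublist (List.sublist_append_left _ _)
    have hle : ∀ y ∈ p, y ≤ x := by
      have := (List.pairwise_append.mp hpx).2.2
      intro y hy; exact this y hy x (by simp)
    have := ih (p ++ [x]) (f_alt st x) (inv_step p st x h hp hle) hsort'
    simpa [List.append_assoc, List.foldl_cons] using this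

theorem portB_isAnswer (arr : List Int) (hne : arr ≠ []) :
    IsAnswer arr (migratoryBirds_alt arr) := by
  have hsne : PySem.List.sorted arr (fun x => x) false ≠ [] := by
    intro h; exact hne ((PySem.List.sorted_eq_nil_iff arr (fun x => x) false).mp h)
  obtain ⟨h, t, hst⟩ : ∃ h t, PySem.List.sorted arr (fun x => x) false = h :: t := by
    cases hc : PySem.List.sorted arr (fun x => x) false with
    | nil => exact absurd hc hsne
    | cons h t => exact ⟨h, t, rfl⟩
  have hperm : (PySem.List.sorted arr (fun x => x) false).Perm arr :=
    PySem.List.sorted_perm arr (fun x => x) false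
  have hsort : (PySem.List.sorted arr (fun x => x) false).Pairwise (· ≤ ·) := by
    simpa using PySem.List.sorted_pairwise arr (fun x => x)
  rw [hst] at hperm hsort
  have hbase : ScanInv [h] (f_alt (h, 0, h, 0) h) := by
    have : f_alt (h, 0, h, 0) h = (h, 1, h, 1) := by simp [f_alt]
    rw [this]
    refine ⟨by simp, by simp, by simp, by simp, ?_, ?_⟩
    · intro y hy; simp only [List.mem_singleton] at hy; subst hy; simp
    · intro y hy _; simp only [List.mem_singleton] at hy; exact le_of_eq hy.symm
  have hloop : ScanInv ([h] ++ t) (t.foldl f_alt (f_alt (h, 0, h, 0) h)) := by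
    apply inv_loop t [h] _ hbase
    simpa using hsort
  have hfold : ScanInv (h :: t) ((h :: t).foldl f_alt (h, 0, h, 0)) := by
    simpa using hloop
  have halt : migratoryBirds_alt arr = ((h :: t).foldl f_alt (h, 0, h, 0)).1 := by
    unfold migratoryBirds_alt
    rw [hst]
    rfl
  rw [halt]
  obtain ⟨i1, i2, i3, i4, i5, i6⟩ := hfold
  have hcz : ∀ y : Int, (h :: t).count y = arr.count y := fun y => hperm.count_eq y
  refine ⟨hperm.mem_iff.mp i3, ?_, ?_⟩
  · intro y hy
    have hys : y ∈ h :: t := hperm.mem_iff.mpr hy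
    have := i5 y hys
    rw [i4] at this
    rw [← hcz y, ← hcz _]
    exact_mod_cast this
  · intro y hy hcy
    have hys : y ∈ h :: t := hperm.mem_iff.mpr hy
    apply i6 y hys
    rw [hcz y, hcz _]
    exact hcy

-- ===== VERDICT (by name: the statement is the Claim_ definition above) =====
theorem migratoryBirds_spec : Claim_equal_migratoryBirds := by
  intro arr _ hpre
  unfold Spec_migratoryBirds
  exact isAnswer_unique (portA_isAnswer arr hpre) (portB_isAnswer arr hpre)
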